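-- pv_equiv track=rewrite | github.com/yasufumi-nakata/Pytra | src/toolchain/emit/scala/emitter/scala_native_emitter.py | _tuple_scala_type
-- ===== SOURCE A (Python) =====
-- from typing import Any
--
-- def _arraybuffer_elem_scala_type(py_type_name: str) -> str:
--     if py_type_name in {"int", "int64", "uint8"}:
--         return "Long"
--     if py_type_name in {"float", "float64"}:
--         return "Double"
--     if py_type_name == "bool":
--         return "Boolean"
--     if py_type_name == "str":
--         return "String"
--     if py_type_name == "Path":
--         return "String"
--     return "Any"
--
-- def _tuple_scala_type(type_name: str) -> str:
--     if not type_name.startswith("tuple[") or not type_name.endswith("]"):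
--         return "mutable.ArrayBuffer[Any]"
--     elems = _tuple_element_types(type_name)
--     if len(elems) == 0:
--         return "mutable.ArrayBuffer[Any]"
--     first_t = _arraybuffer_elem_scala_type(elems[0])
--     if first_t == "Any":
--         return "mutable.ArrayBuffer[Any]"
--     i = 1
--     while i < len(elems):
--         if _arraybuffer_elem_scala_type(elems[i]) != first_t:
--             return "mutable.ArrayBuffer[Any]"
--         i += 1
--     return "mutable.ArrayBuffer[" + first_t + "]"
--
-- def _tuple_element_types(type_name: Any) -> list[str]:
--     if not isinstance(type_name, str):
--         return []
--     ts: str = type_name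
--     if not ts.startswith("tuple[") or not ts.endswith("]"):
--         return []
--     body = type_name[6:-1]
--     out: list[str] = []
--     buf = ""
--     depth = 0
--     i = 0
--     while i < len(body):
--         ch = body[i]
--         if ch == "[":
--             depth += 1
--             buf += ch
--             i += 1
--             continue
--         if ch == "]":
--             depth -= 1
--             buf += ch
--             i += 1
--             continue
--         if ch == "," and depth == 0:
--             piece = buf.strip()
--             if piece != "":
--                 out.append(piece)
--             buf = ""
--             i += 1
--             continue
--         buf += ch
--         i += 1
--     tail = buf.strip()
--     if tail != "":
--         out.append(tail)
--     return out
-- ===== SOURCE B (Python) =====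
-- _SCALA_ELEM = {
--     "int": "Long", "int64": "Long", "uint8": "Long",
--     "float": "Double", "float64": "Double",
--     "bool": "Boolean", "str": "String", "Path": "String",
-- }
--
-- def _split_top_level(body: str) -> list:
--     depth = 0
--     for i, ch in enumerate(body):
--         if ch == "[":
--             depth += 1
--         elif ch == "]":
--             depth -= 1
--         elif ch == "," and depth == 0:
--             return [body[:i]] + _split_top_level(body[i + 1:])
--     return [body]
--
-- def _tuple_scala_type(type_name: str) -> str:
--     if type_name.startswith("tuple[") and type_name.endswith("]"):
--         acc = None
--         for piece in _split_top_level(type_name[6:-1]):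
--             piece = piece.strip()
--             if piece == "":
--                 continue
--             t = _SCALA_ELEM.get(piece, "Any")
--             acc = t if acc is None else (acc if t == acc else "Any")
--         if acc is not None and acc != "Any":
--             return "mutable.ArrayBuffer[" + acc + "]"
--     return "mutable.ArrayBuffer[Any]"
-- ===== Notes on version B (the rewrite author's own statement) =====
-- stated objective: alternative
-- what changed: Replaces A's buffer/depth accumulator parse loop with a recursive top-level splitter, A's if-chain element mapper with a dict lookup table, and A's first_t flag plus index while-loop with a single fold over the pieces carrying an Option accumulator that collapses to the fallback element type on any mismatch.
import Mathlib
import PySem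

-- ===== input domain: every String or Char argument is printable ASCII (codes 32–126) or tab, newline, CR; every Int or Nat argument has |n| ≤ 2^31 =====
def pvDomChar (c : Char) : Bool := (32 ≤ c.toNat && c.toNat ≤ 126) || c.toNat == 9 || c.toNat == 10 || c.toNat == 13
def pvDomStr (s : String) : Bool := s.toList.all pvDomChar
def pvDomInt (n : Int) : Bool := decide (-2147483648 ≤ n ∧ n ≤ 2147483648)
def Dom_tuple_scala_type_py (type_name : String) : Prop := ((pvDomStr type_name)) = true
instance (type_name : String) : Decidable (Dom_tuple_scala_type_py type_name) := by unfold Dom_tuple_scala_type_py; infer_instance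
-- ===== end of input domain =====

-- B replaces A's buffer/depth accumulator parse loop with a recursive top-level splitter,
-- A's if-chain element mapper with a lookup table, and A's first_t + while-loop with a
-- single fold carrying an Option accumulator (idiomatic; same cost).

-- ===== PORT A =====
-- helper _arraybuffer_elem_scala_type (A's if-chain)
def arraybufferElemScalaType (py_type_name : String) : String :=
  if py_type_name = "int" ∨ py_type_name = "int64" ∨ py_type_name = "uint8" then "Long"
  else if py_type_name = "float" ∨ py_type_name = "float64" then "Double"
  else if py_type_name = "bool" then "Boolean"
  else if py_type_name = "str" then "String"
  else if py_type_name = "Path" then "String"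
  else "Any"

-- the character-scanning while-loop of _tuple_element_types;
-- state: remaining chars of body, out, buf, depth
def tupleElemLoop : List Char → List String → List Char → Int → List String
  | [], out, buf, _ =>
      let tail := PySem.Str.strip (String.ofList buf)
      if tail ≠ "" then out ++ [tail] else out
  | ch :: rest, out, buf, depth =>
      if ch = '[' then tupleElemLoop rest out (buf ++ [ch]) (depth + 1)
      else if ch = ']' then tupleElemLoop rest out (buf ++ [ch]) (depth - 1)
      else if ch = ',' ∧ depth = 0 then
        let piece := PySem.Str.strip (String.ofList buf)
        tupleElemLoop rest (if piece ≠ "" then out ++ [piece] else out) [] depth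
      else tupleElemLoop rest out (buf ++ [ch]) depth

-- helper _tuple_element_types (the isinstance guard is vacuous for a String argument)
def tupleElementTypes (type_name : String) : List String :=
  if ¬ (PySem.Str.startswith type_name "tuple[") ∨ ¬ (PySem.Str.endswith type_name "]") then []
  else
    let body := PySem.List.slice type_name.toList (some 6) (some (-1))
    tupleElemLoop body [] [] 0

-- A's while-loop 'i = 1; while i < len(elems): …' over the remaining elements
def tupleWhileLoop (first_t : String) : List String → Bool
  | [] => true
  | e :: rest =>
      if arraybufferElemScalaType e ≠ first_t then false else tupleWhileLoop first_t rest

def tuple_scala_type_py (type_name : String) : String :=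
  if ¬ (PySem.Str.startswith type_name "tuple[") ∨ ¬ (PySem.Str.endswith type_name "]") then
    "mutable.ArrayBuffer[Any]"
  else
    let elems := tupleElementTypes type_name
    match elems with
    | [] => "mutable.ArrayBuffer[Any]"
    | e0 :: rest =>
      let first_t := arraybufferElemScalaType e0
      if first_t = "Any" then "mutable.ArrayBuffer[Any]"
      else if tupleWhileLoop first_t rest then "mutable.ArrayBuffer[" ++ first_t ++ "]"
      else "mutable.ArrayBuffer[Any]"

-- ===== PORT B =====
-- B's lookup table _SCALA_ELEM (a dict; .get(piece, "Any"))
def scalaElemTable : PySem.Dict String String :=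
  PySem.Dict.ofList
    [("int", "Long"), ("int64", "Long"), ("uint8", "Long"),
     ("float", "Double"), ("float64", "Double"),
     ("bool", "Boolean"), ("str", "String"), ("Path", "String")]

-- prepend a char to the first piece (Python builds the same prefix as body[:i])
def consHead (c : Char) : List (List Char) → List (List Char)
  | [] => [[c]]
  | p :: ps => (c :: p) :: ps

-- B's _split_top_level: recurse at the first top-level comma
def splitTop : List Char → Int → List (List Char)
  | [], _ => [[]]
  | c :: rest, depth =>
      if c = '[' then consHead c (splitTop rest (depth + 1))
      else if c = ']' then consHead c (splitTop rest (depth - 1))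
      else if c = ',' ∧ depth = 0 then [] :: splitTop rest depth
      else consHead c (splitTop rest depth)

-- B's for-loop over the pieces: strip, skip empties, fold the Option accumulator
def foldAcc : Option String → List String → Option String
  | acc, [] => acc
  | acc, p :: ps =>
      let piece := PySem.Str.strip p
      if piece = "" then foldAcc acc ps
      else
        let t := PySem.Dict.getD scalaElemTable piece "Any"
        foldAcc (match acc with
                 | none => some t
                 | some a => if t = a then some a else some "Any") ps

def tuple_scala_type_py_alt (type_name : String) : String :=
  if PySem.Str.startswith type_name "tuple[" ∧ PySem.Str.endswith type_name "]" then
    let body := PySem.List.slice type_name.toList (some 6) (some (-1))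
    match foldAcc none ((splitTop body 0).map String.ofList) with
    | some a => if a ≠ "Any" then "mutable.ArrayBuffer[" ++ a ++ "]" else "mutable.ArrayBuffer[Any]"
    | none => "mutable.ArrayBuffer[Any]"
  else "mutable.ArrayBuffer[Any]"

-- ===== PRECONDITION & SPEC =====
def Spec_tuple_scala_type_py (type_name : String) (out : String) : Prop := out = tuple_scala_type_py_alt type_name
instance (type_name : String) (out : String) : Decidable (Spec_tuple_scala_type_py type_name out) := by unfold Spec_tuple_scala_type_py; infer_instance

-- ===== CLAIM (what is proved, stated in full; the proofs are below) =====
def Claim_equal_tuple_scala_type_py : Prop := ∀ (type_name : String), Dom_tuple_scala_type_py type_name → Spec_tuple_scala_type_py type_name (tuple_scala_type_py type_name)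

-- ===== LEMMAS AND PROOFS =====

-- proof-only helper: B's fold step on an already-stripped non-empty piece
def stepB (acc : Option String) (e : String) : Option String :=
  match acc with
  | none => some (PySem.Dict.getD scalaElemTable e "Any")
  | some a => if PySem.Dict.getD scalaElemTable e "Any" = a then some a else some "Any"

-- B's table lookup agrees with A's if-chain on every string
theorem lookup_eq_chain (s : String) :
    PySem.Dict.getD scalaElemTable s "Any" = arraybufferElemScalaType s := by
  unfold arraybufferElemScalaType
  by_cases h1 : s = "int"
  · subst h1; decide
  by_cases h2 : s = "int64"
  · subst h2; decide
  by_cases h3 : s = "uint8"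
  · subst h3; decide
  by_cases h4 : s = "float"
  · subst h4; decide
  by_cases h5 : s = "float64"
  · subst h5; decide
  by_cases h6 : s = "bool"
  · subst h6; decide
  by_cases h7 : s = "str"
  · subst h7; decide
  by_cases h8 : s = "Path"
  · subst h8; decide
  have htab : PySem.Dict.getD scalaElemTable s "Any" =
      ((([("int", "Long"), ("int64", "Long"), ("uint8", "Long"),
        ("float", "Double"), ("float64", "Double"),
        ("bool", "Boolean"), ("str", "String"), ("Path", "String")] : List (String × String)).find?
        (fun p => p.1 == s)).map (fun p => p.2)).getD "Any" := rfl
  have e : ∀ k : String, ¬ s = k → (k == s) = false :=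
    fun k hk => beq_eq_false_iff_ne.2 (fun h => hk h.symm)
  rw [htab]
  simp [List.find?, e _ h1, e _ h2, e _ h3, e _ h4, e _ h5, e _ h6, e _ h7, e _ h8,
        h1, h2, h3, h4, h5, h6, h7, h8]

theorem splitTop_ne_nil (l : List Char) (d : Int) : splitTop l d ≠ [] := by
  cases l with
  | nil => simp [splitTop]
  | cons c rest =>
    unfold splitTop
    split_ifs <;> first
      | (apply List.cons_ne_nil)
      | (unfold consHead; split <;> simp)

-- proof-only helper: glue buf onto the first piece
def withHead (buf : List Char) : List (List Char) → List (List Char)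
  | [] => [buf]
  | p :: ps => (buf ++ p) :: ps

-- proof-only helper: strip each piece, drop the empty ones
def finishPieces (ls : List (List Char)) : List String :=
  (ls.map (fun p => PySem.Str.strip (String.ofList p))).filter (fun s => s ≠ "")

theorem withHead_consHead (buf : List Char) (c : Char) (ls : List (List Char)) (h : ls ≠ []) :
    withHead buf (consHead c ls) = withHead (buf ++ [c]) ls := by
  cases ls with
  | nil => exact absurd rfl h
  | cons p ps => simp [withHead, consHead]

-- A's parse loop produces exactly the stripped non-empty pieces of B's splitter
theorem tupleElemLoop_eq_split (l : List Char) :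
    ∀ (out : List String) (buf : List Char) (d : Int),
    tupleElemLoop l out buf d = out ++ finishPieces (withHead buf (splitTop l d)) := by
  induction l with
  | nil =>
    intro out buf d
    simp only [tupleElemLoop, splitTop, withHead, finishPieces, List.map, List.append_nil]
    by_cases h : PySem.Str.strip (String.ofList buf) = "" <;> simp [h, List.filter]
  | cons c rest ih =>
    intro out buf d
    unfold tupleElemLoop splitTop
    split_ifs with h1 h2 h3
    · rw [ih, withHead_consHead _ _ _ (splitTop_ne_nil _ _)]
    · rw [ih, withHead_consHead _ _ _ (splitTop_ne_nil _ _)]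
    · rw [ih]
      have hw : withHead buf ([] :: splitTop rest d) = buf :: splitTop rest d := by
        simp [withHead]
      have hw2 : withHead ([] : List Char) (splitTop rest d) = splitTop rest d := by
        cases h : splitTop rest d with
        | nil => exact absurd h (splitTop_ne_nil _ _)
        | cons p ps => simp [withHead]
      rw [hw, hw2]
      by_cases hp : PySem.Str.strip (String.ofList buf) = "" <;>
        simp [finishPieces, hp]
    · rw [ih, withHead_consHead _ _ _ (splitTop_ne_nil _ _)]

-- B's fold with strip-and-skip equals a plain fold over the stripped non-empty pieces
theorem foldAcc_eq_foldl (l : List String) :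
    ∀ acc, foldAcc acc l =
      List.foldl stepB acc ((l.map PySem.Str.strip).filter (fun s => s ≠ "")) := by
  induction l with
  | nil => intro acc; rfl
  | cons p ps ih =>
    intro acc
    unfold foldAcc
    by_cases h : PySem.Str.strip p = "" <;> simp [h, ih, stepB]

theorem foldl_stepB_any (es : List String) :
    List.foldl stepB (some "Any") es = some "Any" := by
  induction es with
  | nil => rfl
  | cons e rest ih =>
    simp only [List.foldl, stepB]
    split_ifs with h <;> simp_all

theorem foldl_stepB_some (es : List String) (a : String) :
    List.foldl stepB (some a) es =
      some (if es.all (fun e => arraybufferElemScalaType e == a) then a else "Any") := by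
  induction es with
  | nil => simp
  | cons e rest ih =>
    simp only [List.foldl, List.all_cons, stepB, lookup_eq_chain]
    by_cases h : arraybufferElemScalaType e = a
    · simp [h, ih]
    · simp [h, foldl_stepB_any]

-- A's while-loop succeeds iff every remaining mapped type equals first_t
theorem tupleWhileLoop_eq_all (first_t : String) (l : List String) :
    tupleWhileLoop first_t l = l.all (fun e => arraybufferElemScalaType e == first_t) := by
  induction l with
  | nil => rfl
  | cons e rest ih =>
    simp only [tupleWhileLoop, List.all_cons, ih]
    by_cases h : arraybufferElemScalaType e = first_t <;> simp [h]

-- classification agreement on the element list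
theorem classify_eq (es : List String) :
    (match es with
     | [] => "mutable.ArrayBuffer[Any]"
     | e0 :: rest =>
       if arraybufferElemScalaType e0 = "Any" then "mutable.ArrayBuffer[Any]"
       else if tupleWhileLoop (arraybufferElemScalaType e0) rest = true then
         "mutable.ArrayBuffer[" ++ arraybufferElemScalaType e0 ++ "]"
       else "mutable.ArrayBuffer[Any]")
    = (match List.foldl stepB none es with
       | some a => if a ≠ "Any" then "mutable.ArrayBuffer[" ++ a ++ "]" else "mutable.ArrayBuffer[Any]"
       | none => "mutable.ArrayBuffer[Any]") := by
  cases es with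
  | nil => rfl
  | cons e0 rest =>
    dsimp only
    have h0 : List.foldl stepB none (e0 :: rest) =
        List.foldl stepB (some (arraybufferElemScalaType e0)) rest := by
      simp [stepB, lookup_eq_chain]
    rw [h0, foldl_stepB_some, tupleWhileLoop_eq_all]
    dsimp only
    by_cases hany : arraybufferElemScalaType e0 = "Any"
    · by_cases hall : rest.all (fun e => arraybufferElemScalaType e == arraybufferElemScalaType e0) <;>
        simp [hany]
    · by_cases hall : rest.all (fun e => arraybufferElemScalaType e == arraybufferElemScalaType e0) <;>
        simp [hany, hall]

-- ===== VERDICT (by name: the statement is the Claim_ definition above) =====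
theorem tuple_scala_type_py_spec : Claim_equal_tuple_scala_type_py := by
  intro type_name _
  unfold Spec_tuple_scala_type_py tuple_scala_type_py tuple_scala_type_py_alt
  by_cases hg : PySem.Str.startswith type_name "tuple[" ∧ PySem.Str.endswith type_name "]"
  · have hng : ¬ (¬ (PySem.Str.startswith type_name "tuple[") ∨ ¬ (PySem.Str.endswith type_name "]")) := by
      simpa using hg
    rw [if_neg hng, if_pos hg]
    dsimp only
    have helems : tupleElementTypes type_name =
        finishPieces (splitTop (PySem.List.slice type_name.toList (some 6) (some (-1))) 0) := by
      unfold tupleElementTypes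
      rw [if_neg hng, tupleElemLoop_eq_split]
      cases h : splitTop (PySem.List.slice type_name.toList (some 6) (some (-1))) 0 with
      | nil => exact absurd h (splitTop_ne_nil _ _)
      | cons p ps => simp [withHead]
    have hfold : foldAcc none ((splitTop (PySem.List.slice type_name.toList (some 6) (some (-1))) 0).map String.ofList)
        = List.foldl stepB none (finishPieces (splitTop (PySem.List.slice type_name.toList (some 6) (some (-1))) 0)) := by
      rw [foldAcc_eq_foldl]
      unfold finishPieces
      rw [List.map_map]
      rfl
    rw [hfold, helems]
    exact classify_eq _
  · have hng : ¬ (PySem.Str.startswith type_name "tuple[") ∨ ¬ (PySem.Str.endswith type_name "]") := by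
      tauto
    rw [if_pos hng, if_neg hg]
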